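-- pv_equiv track=rewrite | github.com/ishita-gupta-2/Music-Composition-using-Genetic-Algorithm | genetic_algo_fitness.py | triad_fitness
-- ===== SOURCE A (Python) =====
-- def triad_fitness(chromosome, scale):
--     tf = 2
--     for i in range(len(chromosome) - 2):
--         abi = abs(chromosome[i][1] * len(scale) + chromosome[i][0])  # Absolute value of note index
--         abi_plus_1 = abs(chromosome[i + 1][1] * len(scale) + chromosome[i + 1][0])
--         abi_plus_2 = abs(chromosome[i + 2][1] * len(scale) + chromosome[i + 2][0])
--         if (abi < abi_plus_1 < abi_plus_2) or (abi > abi_plus_1 > abi_plus_2):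
--             tf += 1
--     return tf
-- ===== SOURCE B (Python) =====
-- def triad_fitness(chromosome, scale):
--     # Count monotone triples run-by-run: each maximal strictly monotone run of
--     # m consecutive note values contributes m-2 triples.
--     L = len(scale)
--     vals = [abs(y * L + x) for (x, y) in chromosome]
--     n = len(vals)
--     total = 2
--     i = 0
--     while i + 1 < n:
--         if vals[i] == vals[i + 1]:
--             i += 1
--             continue
--         up = vals[i] < vals[i + 1]
--         j = i + 1
--         while j + 1 < n and vals[j] != vals[j + 1] and (vals[j] < vals[j + 1]) == up:
--             j += 1
--         total += max(j - i - 1, 0)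
--         i = j
--     return total
-- ===== Notes on version B (the rewrite author's own statement) =====
-- stated objective: alternative
-- what changed: Replaces A's per-position loop testing each triple of three re-read notes with a run-detection scan: a nested while loop finds each maximal strictly monotone run of precomputed note values and adds its triple count (run length minus 2) arithmetically.
import Mathlib
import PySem

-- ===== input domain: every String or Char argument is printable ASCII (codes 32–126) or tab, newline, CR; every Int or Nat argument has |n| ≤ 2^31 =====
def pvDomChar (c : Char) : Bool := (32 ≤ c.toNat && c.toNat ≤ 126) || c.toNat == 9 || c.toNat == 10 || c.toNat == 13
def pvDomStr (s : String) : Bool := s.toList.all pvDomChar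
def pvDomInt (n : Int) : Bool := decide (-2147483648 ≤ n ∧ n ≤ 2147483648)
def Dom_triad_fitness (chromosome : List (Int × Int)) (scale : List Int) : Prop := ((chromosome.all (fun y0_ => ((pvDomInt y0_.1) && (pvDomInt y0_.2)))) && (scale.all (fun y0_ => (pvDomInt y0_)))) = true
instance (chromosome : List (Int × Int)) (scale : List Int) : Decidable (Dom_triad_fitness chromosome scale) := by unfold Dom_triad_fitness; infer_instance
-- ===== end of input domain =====

-- B replaces A's per-position triple test with a run-detection scan: a nested while loop
-- finds each maximal strictly monotone run of precomputed note values and adds its triple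
-- count (run length minus 2) arithmetically (alternative decomposition, same cost).

-- ===== PORT A =====
-- literal port of A: for i in range(len(chromosome)-2), read the three notes by index, count strict monotone triples
def triad_fitness (chromosome : List (Int × Int)) (scale : List Int) : Int :=
  (PySem.List.pyRange 0 ((chromosome.length : Int) - 2) 1).foldl
    (fun tf i =>
      let abi := |(PySem.List.pyGetD chromosome i ((0:Int),(0:Int))).2 * (scale.length : Int) + (PySem.List.pyGetD chromosome i ((0:Int),(0:Int))).1|
      let abi1 := |(PySem.List.pyGetD chromosome (i+1) ((0:Int),(0:Int))).2 * (scale.length : Int) + (PySem.List.pyGetD chromosome (i+1) ((0:Int),(0:Int))).1|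
      let abi2 := |(PySem.List.pyGetD chromosome (i+2) ((0:Int),(0:Int))).2 * (scale.length : Int) + (PySem.List.pyGetD chromosome (i+2) ((0:Int),(0:Int))).1|
      if (abi < abi1 ∧ abi1 < abi2) ∨ (abi > abi1 ∧ abi1 > abi2) then tf + 1 else tf)
    2

-- ===== PORT B =====
-- literal port of Source B's inner while loop: advance j while the strictly monotone run in direction `up` continues
def bRun (vals : List Int) (n : Nat) (up : Bool) (j : Nat) : Nat :=
  if h : j + 1 < n ∧ vals.getD j 0 ≠ vals.getD (j+1) 0 ∧ decide (vals.getD j 0 < vals.getD (j+1) 0) = up then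
    bRun vals n up (j+1)
  else j
termination_by n - j
decreasing_by omega

-- termination helper for bOuter (the outer while loop advances i to j = bRun … ≥ i+1)
theorem bRun_ge (vals : List Int) (n : Nat) (up : Bool) (j : Nat) : j ≤ bRun vals n up j := by
  induction j using bRun.induct (vals := vals) (n := n) (up := up) with
  | case1 j h ih => rw [bRun]; rw [dif_pos h]; omega
  | case2 j h => rw [bRun]; rw [dif_neg h]

-- literal port of Source B's outer while loop: skip equal steps, otherwise jump over the maximal run and add its triple count
def bOuter (vals : List Int) (n : Nat) (i : Nat) (total : Int) : Int :=
  if h : i + 1 < n then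
    if vals.getD i 0 = vals.getD (i+1) 0 then bOuter vals n (i+1) total
    else
      bOuter vals n (bRun vals n (decide (vals.getD i 0 < vals.getD (i+1) 0)) (i+1))
        (total + max ((bRun vals n (decide (vals.getD i 0 < vals.getD (i+1) 0)) (i+1) : Int) - (i : Int) - 1) 0)
  else total
termination_by n - i
decreasing_by
  · omega
  · have := bRun_ge vals n (decide (vals.getD i 0 < vals.getD (i+1) 0)) (i+1)
    omega

-- literal port of Source B: absolute note values once, then the run scan starting with total = 2
def triad_fitness_alt (chromosome : List (Int × Int)) (scale : List Int) : Int :=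
  let L : Int := (scale.length : Int)
  let vals := chromosome.map (fun p => |p.2 * L + p.1|)
  bOuter vals vals.length 0 2

-- ===== PRECONDITION & SPEC =====
def Spec_triad_fitness (chromosome : List (Int × Int)) (scale : List Int) (out : Int) : Prop := out = triad_fitness_alt chromosome scale
instance (chromosome : List (Int × Int)) (scale : List Int) (out : Int) : Decidable (Spec_triad_fitness chromosome scale out) := by unfold Spec_triad_fitness; infer_instance

-- ===== CLAIM (what is proved, stated in full; the proofs are below) =====
def Claim_equal_triad_fitness : Prop := ∀ (chromosome : List (Int × Int)) (scale : List Int), Dom_triad_fitness chromosome scale → Spec_triad_fitness chromosome scale (triad_fitness chromosome scale)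

-- ===== LEMMAS AND PROOFS =====

-- the strict-monotone-triple predicate (abbrev so Decidable is inferred by unfolding)
abbrev mono3 (a b c : Int) : Prop := (a < b ∧ b < c) ∨ (a > b ∧ b > c)

-- count of consecutive triples satisfying cond, by structural recursion
def triplesC {α : Type} (cond : α → α → α → Prop) [inst : ∀ a b c, Decidable (cond a b c)] : List α → Int
  | a :: b :: c :: rest => (if cond a b c then 1 else 0) + triplesC cond (b :: c :: rest)
  | _ => 0

lemma pyGetD_coe_succ_cons {α : Type} (x : α) (tl : List α) (k : Nat) (d : α) :
    PySem.List.pyGetD (x :: tl) ((k : Int) + 1) d = PySem.List.pyGetD tl (k : Int) d := by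
  have h : ((k : Int) + 1) = ((k + 1 : Nat) : Int) := by push_cast; ring
  rw [h, PySem.List.pyGetD_natCast, PySem.List.pyGetD_natCast]
  simp [List.getD]

lemma foldl_shift {α : Type} (cond : α → α → α → Prop) [inst : ∀ a b c, Decidable (cond a b c)]
    (d x : α) (tl : List α) (m : Nat) (acc : Int) :
    (PySem.List.pyRange 1 ((m : Int) + 1) 1).foldl
      (fun tf i => if cond (PySem.List.pyGetD (x :: tl) i d) (PySem.List.pyGetD (x :: tl) (i+1) d) (PySem.List.pyGetD (x :: tl) (i+2) d) then tf + 1 else tf) acc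
    = (PySem.List.pyRange 0 (m : Int) 1).foldl
      (fun tf i => if cond (PySem.List.pyGetD tl i d) (PySem.List.pyGetD tl (i+1) d) (PySem.List.pyGetD tl (i+2) d) then tf + 1 else tf) acc := by
  rw [PySem.List.pyRange_one, PySem.List.pyRange_one]
  have h1 : ((m : Int) + 1 - 1).toNat = m := by omega
  have h2 : ((m : Int) - 0).toNat = m := by omega
  rw [h1, h2, List.foldl_map, List.foldl_map]
  congr 1
  funext tf k
  have e0 : (1 : Int) + (k : Int) = (k : Int) + 1 := by ring
  have e1 : (k : Int) + 1 + 1 = ((k + 1 : Nat) : Int) + 1 := by push_cast; ring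
  have e2 : (k : Int) + 1 + 2 = ((k + 2 : Nat) : Int) + 1 := by push_cast; ring
  have f0 : (0 : Int) + (k : Int) = (k : Int) := by ring
  have f1 : (0 : Int) + (k : Int) + 1 = ((k + 1 : Nat) : Int) := by push_cast; ring
  have f2 : (0 : Int) + (k : Int) + 2 = ((k + 2 : Nat) : Int) := by push_cast; ring
  rw [e0, e1, e2, f0, pyGetD_coe_succ_cons x tl k, pyGetD_coe_succ_cons x tl (k+1), pyGetD_coe_succ_cons x tl (k+2)]
  push_cast
  ring_nf

-- A's indexed loop over range(len-2) computed structurally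
lemma foldl_window3 {α : Type} (cond : α → α → α → Prop) [inst : ∀ a b c, Decidable (cond a b c)] (d : α) :
    ∀ (xs : List α) (acc : Int),
    (PySem.List.pyRange 0 ((xs.length : Int) - 2) 1).foldl
      (fun tf i => if cond (PySem.List.pyGetD xs i d) (PySem.List.pyGetD xs (i+1) d) (PySem.List.pyGetD xs (i+2) d) then tf + 1 else tf) acc
    = acc + triplesC cond xs := by
  intro xs
  induction xs using triplesC.induct with
  | case1 a b c rest ih =>
    intro acc
    have he : ((List.length (a :: b :: c :: rest) : Int) - 2) = (rest.length : Int) + 1 := by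
      simp [List.length_cons]; omega
    rw [he, PySem.List.pyRange_one_cons (by positivity)]
    rw [List.foldl_cons]
    have g0 : PySem.List.pyGetD (a :: b :: c :: rest) (0 : Int) d = a := PySem.List.pyGetD_zero_cons _ _ _
    have g1 : PySem.List.pyGetD (a :: b :: c :: rest) ((0 : Int) + 1) d = b := by
      have : ((0 : Int) + 1) = ((0 : Nat) : Int) + 1 := by norm_num
      rw [this, pyGetD_coe_succ_cons]; simp [PySem.List.pyGetD_zero_cons b (c :: rest) d]
    have g2 : PySem.List.pyGetD (a :: b :: c :: rest) ((0 : Int) + 2) d = c := by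
      have : ((0 : Int) + 2) = (((1 : Nat) : Int)) + 1 := by norm_num
      rw [this, pyGetD_coe_succ_cons]
      have : ((1 : Nat) : Int) = ((0 : Nat) : Int) + 1 := by norm_num
      rw [this, pyGetD_coe_succ_cons]; simp [PySem.List.pyGetD_zero_cons c rest d]
    rw [g0, g1, g2]
    rw [show (0 : Int) + 1 = 1 by ring] at *
    rw [foldl_shift cond d a (b :: c :: rest) rest.length]
    have hlen : ((rest.length : Int)) = ((List.length (b :: c :: rest) : Int) - 2) := by
      simp [List.length_cons]; omega
    rw [hlen, ih]
    have ht : triplesC cond (a :: b :: c :: rest) = (if cond a b c then 1 else 0) + triplesC cond (b :: c :: rest) := rfl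
    rw [ht]
    split_ifs <;> ring
  | case2 x hx =>
    intro acc
    have hle : ((x.length : Int) - 2) ≤ 0 := by
      match x, hx with
      | [], _ => simp
      | [a], _ => simp
      | [a, b], _ => simp
      | a :: b :: c :: rest, hx => exact absurd rfl (hx a b c rest)
    rw [PySem.List.pyRange_one_eq_nil (by omega)]
    have : triplesC cond x = 0 := by
      match x, hx with
      | [], _ => rfl
      | [a], _ => rfl
      | [a, b], _ => rfl
      | a :: b :: c :: rest, hx => exact absurd rfl (hx a b c rest)
    rw [this]
    simp

lemma triplesC_map {α β : Type} (cond : β → β → β → Prop) [inst : ∀ a b c, Decidable (cond a b c)]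
    (f : α → β) : ∀ (xs : List α),
    triplesC (fun a b c => cond (f a) (f b) (f c)) xs = triplesC cond (xs.map f) := by
  intro xs
  induction xs using triplesC.induct with
  | case1 a b c rest ih =>
    have h1 : triplesC (fun a b c => cond (f a) (f b) (f c)) (a :: b :: c :: rest)
        = (if cond (f a) (f b) (f c) then 1 else 0) + triplesC (fun a b c => cond (f a) (f b) (f c)) (b :: c :: rest) := rfl
    have h2 : triplesC cond (f a :: f b :: f c :: rest.map f)
        = (if cond (f a) (f b) (f c) then 1 else 0) + triplesC cond (f b :: f c :: rest.map f) := rfl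
    simp only [List.map_cons, h1, h2, ih]
  | case2 x hx =>
    match x, hx with
    | [], _ => rfl
    | [a], _ => rfl
    | [a, b], _ => rfl
    | a :: b :: c :: rest, hx => exact absurd rfl (hx a b c rest)

lemma triplesC_short {α : Type} (cond : α → α → α → Prop) [inst : ∀ a b c, Decidable (cond a b c)]
    (xs : List α) (h : xs.length ≤ 2) : triplesC cond xs = 0 := by
  match xs, h with
  | [], _ => rfl
  | [a], _ => rfl
  | [a, b], _ => rfl

lemma drop_getD_cons (vals : List Int) (i : Nat) (h : i < vals.length) :
    vals.drop i = vals.getD i 0 :: vals.drop (i+1) := by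
  rw [List.drop_eq_getElem_cons h, List.getD_eq_getElem vals 0 h]

-- one step of triplesC along drop
lemma triplesC_drop_step (vals : List Int) (i : Nat) (h : i + 2 < vals.length) :
    triplesC mono3 (vals.drop i)
      = (if mono3 (vals.getD i 0) (vals.getD (i+1) 0) (vals.getD (i+2) 0) then 1 else 0)
        + triplesC mono3 (vals.drop (i+1)) := by
  have h0 : i < vals.length := by omega
  have h1 : i + 1 < vals.length := by omega
  rw [drop_getD_cons vals i h0]
  conv_lhs => rw [drop_getD_cons vals (i+1) h1, drop_getD_cons vals (i+2) h]
  rw [drop_getD_cons vals (i+1) h1, drop_getD_cons vals (i+2) h]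
  rfl

-- a non-monotone (or nonexistent) triple at position i leaves the count unchanged
lemma triplesC_drop_skip (vals : List Int) (i : Nat)
    (h : i + 2 < vals.length → ¬ mono3 (vals.getD i 0) (vals.getD (i+1) 0) (vals.getD (i+2) 0)) :
    triplesC mono3 (vals.drop i) = triplesC mono3 (vals.drop (i+1)) := by
  by_cases hl : i + 2 < vals.length
  · rw [triplesC_drop_step vals i hl, if_neg (h hl)]; ring
  · rw [triplesC_short mono3 (vals.drop i) (by simp [List.length_drop]; omega),
        triplesC_short mono3 (vals.drop (i+1)) (by simp [List.length_drop]; omega)]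

-- the run found by bRun accounts for exactly (run length − 2) monotone triples
lemma run_split (vals : List Int) (up : Bool) :
    ∀ (k i : Nat), vals.length - i ≤ k → i + 1 < vals.length →
    vals.getD i 0 ≠ vals.getD (i+1) 0 →
    decide (vals.getD i 0 < vals.getD (i+1) 0) = up →
    triplesC mono3 (vals.drop i)
      = ((bRun vals vals.length up (i+1) : Int) - (i : Int) - 1)
        + triplesC mono3 (vals.drop (bRun vals vals.length up (i+1))) := by
  intro k
  induction k with
  | zero => intro i hk hi _ _; omega
  | succ k ih =>
    intro i hk hi hne hdir
    by_cases hc : (i+1) + 1 < vals.length ∧ vals.getD (i+1) 0 ≠ vals.getD (i+2) 0 ∧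
        decide (vals.getD (i+1) 0 < vals.getD (i+2) 0) = up
    · -- the run continues past i+1
      have hrw : bRun vals vals.length up (i+1) = bRun vals vals.length up (i+2) := by
        rw [bRun]; rw [dif_pos hc]
      have hmono : mono3 (vals.getD i 0) (vals.getD (i+1) 0) (vals.getD (i+2) 0) := by
        rcases hc with ⟨_, hne2, hdir2⟩
        have hAB : (vals.getD i 0 < vals.getD (i+1) 0) ↔ (vals.getD (i+1) 0 < vals.getD (i+2) 0) :=
          decide_eq_decide.mp (hdir.trans hdir2.symm)
        by_cases hu : vals.getD i 0 < vals.getD (i+1) 0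
        · exact Or.inl ⟨hu, hAB.mp hu⟩
        · have hnb : ¬ vals.getD (i+1) 0 < vals.getD (i+2) 0 := fun hb => hu (hAB.mpr hb)
          exact Or.inr ⟨by omega, by omega⟩
      have hstep := triplesC_drop_step vals i (by omega)
      rw [if_pos hmono] at hstep
      have hrec := ih (i+1) (by omega) (by omega) hc.2.1 hc.2.2
      rw [show i + 1 + 1 = i + 2 from rfl] at hrec
      have hge := bRun_ge vals vals.length up (i+2)
      rw [hstep, hrec, hrw]
      have : (i + 2 : Nat) ≤ bRun vals vals.length up (i+2) := hge
      push_cast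
      omega
    · -- the run stops at i+1
      have hrw : bRun vals vals.length up (i+1) = i + 1 := by
        rw [bRun]; rw [dif_neg hc]
      rw [hrw]
      have hskip : triplesC mono3 (vals.drop i) = triplesC mono3 (vals.drop (i+1)) := by
        apply triplesC_drop_skip
        intro hl hm
        apply hc
        refine ⟨by omega, ?_, ?_⟩
        · rcases hm with ⟨_, h2⟩ | ⟨_, h2⟩ <;> omega
        · rcases hm with ⟨h1, h2⟩ | ⟨h1, h2⟩
          · rw [decide_eq_true h2, ← hdir, decide_eq_true h1]
          · have hA : ¬ vals.getD i 0 < vals.getD (i+1) 0 := by omega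
            have hB : ¬ vals.getD (i+1) 0 < vals.getD (i+2) 0 := by omega
            rw [decide_eq_false hB, ← hdir, decide_eq_false hA]
      rw [hskip]
      push_cast
      omega

-- the outer scan computes total + (number of monotone triples from position i on)
lemma bOuter_eq (vals : List Int) :
    ∀ (k i : Nat) (total : Int), vals.length - i ≤ k →
    bOuter vals vals.length i total = total + triplesC mono3 (vals.drop i) := by
  intro k
  induction k with
  | zero =>
    intro i total hk
    rw [bOuter]; rw [dif_neg (by omega)]
    rw [triplesC_short mono3 (vals.drop i) (by simp [List.length_drop]; omega)]
    ring
  | succ k ih =>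
    intro i total hk
    by_cases hi : i + 1 < vals.length
    · rw [bOuter]; rw [dif_pos hi]
      by_cases heq : vals.getD i 0 = vals.getD (i+1) 0
      · rw [if_pos heq, ih (i+1) total (by omega)]
        have : triplesC mono3 (vals.drop i) = triplesC mono3 (vals.drop (i+1)) := by
          apply triplesC_drop_skip
          intro _ hm
          rcases hm with ⟨h1, _⟩ | ⟨h1, _⟩ <;> omega
        rw [this]
      · rw [if_neg heq]
        have hge : i + 1 ≤ bRun vals vals.length (decide (vals.getD i 0 < vals.getD (i+1) 0)) (i+1) :=
          bRun_ge vals vals.length _ (i+1)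
        rw [ih (bRun vals vals.length (decide (vals.getD i 0 < vals.getD (i+1) 0)) (i+1)) _ (by omega)]
        have hrun := run_split vals (decide (vals.getD i 0 < vals.getD (i+1) 0)) (vals.length - i) i
          (by omega) hi heq rfl
        rw [hrun]
        have hmax : max ((bRun vals vals.length (decide (vals.getD i 0 < vals.getD (i+1) 0)) (i+1) : Int) - (i : Int) - 1) 0
            = (bRun vals vals.length (decide (vals.getD i 0 < vals.getD (i+1) 0)) (i+1) : Int) - (i : Int) - 1 := by
          have : ((i : Int) + 1) ≤ (bRun vals vals.length (decide (vals.getD i 0 < vals.getD (i+1) 0)) (i+1) : Int) := by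
            exact_mod_cast hge
          omega
        rw [hmax]
        ring
    · rw [bOuter]; rw [dif_neg hi]
      rw [triplesC_short mono3 (vals.drop i) (by simp [List.length_drop]; omega)]
      ring

-- ===== VERDICT (by name: the statement is the Claim_ definition above) =====
theorem triad_fitness_spec : Claim_equal_triad_fitness := by
  intro chromosome scale _
  unfold Spec_triad_fitness triad_fitness triad_fitness_alt
  dsimp only
  rw [foldl_window3 (fun p q r : Int × Int =>
        (|p.2 * (scale.length : Int) + p.1| < |q.2 * (scale.length : Int) + q.1| ∧ |q.2 * (scale.length : Int) + q.1| < |r.2 * (scale.length : Int) + r.1|)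
      ∨ (|p.2 * (scale.length : Int) + p.1| > |q.2 * (scale.length : Int) + q.1| ∧ |q.2 * (scale.length : Int) + q.1| > |r.2 * (scale.length : Int) + r.1|))
      ((0:Int),(0:Int)) chromosome 2]
  rw [bOuter_eq (chromosome.map (fun p : Int × Int => |p.2 * (scale.length : Int) + p.1|))
      ((chromosome.map (fun p : Int × Int => |p.2 * (scale.length : Int) + p.1|)).length) 0 2 (by omega)]
  rw [List.drop_zero]
  rw [triplesC_map mono3 (fun p : Int × Int => |p.2 * (scale.length : Int) + p.1|) chromosome]
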